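-- pv_equiv track=rewrite | github.com/thanhdath/grast-sql | data_processing/spider2.0/export_all_table_mappings.py | analyze_semantic_differences
-- ===== SOURCE A (Python) =====
-- from typing import Dict, List, Any, Set, Tuple
--
-- def analyze_semantic_differences(extra_columns: List[str], missing_columns: List[str]) -> str:
--     """
--     Analyze semantic differences between column sets to provide meaningful insights.
--
--     Args:
--         extra_columns: List of extra columns in the current table
--         missing_columns: List of missing columns in the current table
--
--     Returns:
--         String describing the semantic differences
--     """
--     if not extra_columns and not missing_columns:
--         return ""
--
--     insights = []
--
--     # Analyze naming pattern differences
--     male_age_patterns = []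
--     for col in extra_columns + missing_columns:
--         if 'male_60' in col or 'male_62' in col:
--             male_age_patterns.append(col)
--
--     if male_age_patterns:
--         if any('male_60_to_61' in col for col in male_age_patterns) and any('male_60_61' in col for col in male_age_patterns):
--             insights.append("Column naming variation: 'male_60_61' vs 'male_60_to_61' pattern")
--         if any('male_62_to_64' in col for col in male_age_patterns) and any('male_62_64' in col for col in male_age_patterns):
--             insights.append("Column naming variation: 'male_62_64' vs 'male_62_to_64' pattern")
--
--     # Analyze marital status columns
--     marital_columns = [col for col in extra_columns + missing_columns if any(word in col.lower() for word in ['married', 'divorced', 'widowed', 'separated'])]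
--     if marital_columns:
--         insights.append("Marital status data availability varies")
--
--     # Analyze labor force columns
--     labor_columns = [col for col in extra_columns + missing_columns if any(word in col.lower() for word in ['labor', 'employed', 'unemployed', 'armed_forces'])]
--     if labor_columns:
--         insights.append("Labor force data availability varies")
--
--     # Analyze commute columns
--     commute_columns = [col for col in extra_columns + missing_columns if 'commute' in col.lower()]
--     if commute_columns:
--         insights.append("Commute time data availability varies")
--
--     # Analyze demographic columns
--     demo_columns = [col for col in extra_columns + missing_columns if any(word in col.lower() for word in ['hispanic', 'asian', 'black', 'amerindian'])]
--     if demo_columns: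
--         insights.append("Demographic breakdown availability varies")
--
--     # Analyze education columns
--     edu_columns = [col for col in extra_columns + missing_columns if any(word in col.lower() for word in ['degree', 'diploma', 'education'])]
--     if edu_columns:
--         insights.append("Education data availability varies")
--
--     # Analyze geographic columns
--     geo_columns = [col for col in extra_columns + missing_columns if any(word in col.lower() for word in ['geoid', 'geo_id'])]
--     if geo_columns:
--         insights.append("Geographic identifier format varies")
--
--     # Analyze year-based patterns
--     if len(extra_columns) > 0 and len(missing_columns) > 0:
--         insights.append(f"Schema evolution: {len(extra_columns)} new columns, {len(missing_columns)} removed columns")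
--
--     return "; ".join(insights) if insights else "Column structure differences detected"
-- ===== SOURCE B (Python) =====
-- def analyze_semantic_differences(extra_columns, missing_columns):
--     if not extra_columns and not missing_columns:
--         return ""
--
--     has_60_to_61 = has_60_61 = has_62_to_64 = has_62_64 = False
--     has_marital = has_labor = has_commute = has_demo = has_edu = has_geo = False
--
--     for col in extra_columns + missing_columns:
--         low = col.lower()
--         has_60_to_61 |= 'male_60_to_61' in col
--         has_60_61 |= 'male_60_61' in col
--         has_62_to_64 |= 'male_62_to_64' in col
--         has_62_64 |= 'male_62_64' in col
--         has_marital |= any(w in low for w in ('married', 'divorced', 'widowed', 'separated'))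
--         has_labor |= any(w in low for w in ('labor', 'employed', 'unemployed', 'armed_forces'))
--         has_commute |= 'commute' in low
--         has_demo |= any(w in low for w in ('hispanic', 'asian', 'black', 'amerindian'))
--         has_edu |= any(w in low for w in ('degree', 'diploma', 'education'))
--         has_geo |= any(w in low for w in ('geoid', 'geo_id'))
--
--     insights = []
--     if has_60_to_61 and has_60_61:
--         insights.append("Column naming variation: 'male_60_61' vs 'male_60_to_61' pattern")
--     if has_62_to_64 and has_62_64:
--         insights.append("Column naming variation: 'male_62_64' vs 'male_62_to_64' pattern")
--     if has_marital:
--         insights.append("Marital status data availability varies")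
--     if has_labor:
--         insights.append("Labor force data availability varies")
--     if has_commute:
--         insights.append("Commute time data availability varies")
--     if has_demo:
--         insights.append("Demographic breakdown availability varies")
--     if has_edu:
--         insights.append("Education data availability varies")
--     if has_geo:
--         insights.append("Geographic identifier format varies")
--     if extra_columns and missing_columns:
--         insights.append(f"Schema evolution: {len(extra_columns)} new columns, {len(missing_columns)} removed columns")
--
--     return "; ".join(insights) if insights else "Column structure differences detected"
-- ===== Notes on version B (the rewrite author's own statement) =====
-- stated objective: simpler
-- what changed: Replaces A's nine separate list-building passes over extra_columns+missing_columns (a filtered pattern list plus eight category filter-lists tested for non-emptiness) with a single pass that sets ten boolean flags, then emits the insight strings in the original order from the flags.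
import Mathlib
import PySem

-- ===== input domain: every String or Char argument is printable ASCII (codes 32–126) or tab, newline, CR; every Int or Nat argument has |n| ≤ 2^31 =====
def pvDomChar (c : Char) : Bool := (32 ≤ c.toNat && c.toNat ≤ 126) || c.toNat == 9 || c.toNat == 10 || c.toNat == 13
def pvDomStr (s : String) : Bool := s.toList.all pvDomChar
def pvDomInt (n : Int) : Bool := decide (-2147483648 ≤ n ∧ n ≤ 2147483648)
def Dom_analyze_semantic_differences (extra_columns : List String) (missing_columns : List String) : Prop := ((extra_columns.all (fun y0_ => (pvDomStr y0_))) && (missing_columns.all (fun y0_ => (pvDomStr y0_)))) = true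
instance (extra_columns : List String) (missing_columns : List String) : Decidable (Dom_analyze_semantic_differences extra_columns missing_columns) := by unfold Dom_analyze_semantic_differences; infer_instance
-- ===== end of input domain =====

-- B replaces A's nine separate list-building passes over extra+missing with one pass setting boolean flags, then emits the insights from the flags (objective: simpler, same cost).

-- ===== PORT A =====
def analyze_semantic_differences (extra_columns : List String) (missing_columns : List String) : String :=
  if extra_columns.isEmpty && missing_columns.isEmpty then "" else
  let cols := extra_columns ++ missing_columns
  let insights : List String := []
  let male_age_patterns : List String :=
    cols.foldl (fun acc col =>
      if PySem.Str.isIn "male_60" col || PySem.Str.isIn "male_62" col then acc ++ [col] else acc) []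
  let insights :=
    if ¬ male_age_patterns.isEmpty then
      let insights :=
        if male_age_patterns.any (fun col => PySem.Str.isIn "male_60_to_61" col)
            && male_age_patterns.any (fun col => PySem.Str.isIn "male_60_61" col) then
          insights ++ ["Column naming variation: 'male_60_61' vs 'male_60_to_61' pattern"]
        else insights
      if male_age_patterns.any (fun col => PySem.Str.isIn "male_62_to_64" col)
          && male_age_patterns.any (fun col => PySem.Str.isIn "male_62_64" col) then
        insights ++ ["Column naming variation: 'male_62_64' vs 'male_62_to_64' pattern"]
      else insights
    else insights
  let marital_columns := cols.filter (fun col =>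
    (["married", "divorced", "widowed", "separated"] : List String).any (fun w => PySem.Str.isIn w (PySem.Str.lower col)))
  let insights := if ¬ marital_columns.isEmpty then insights ++ ["Marital status data availability varies"] else insights
  let labor_columns := cols.filter (fun col =>
    (["labor", "employed", "unemployed", "armed_forces"] : List String).any (fun w => PySem.Str.isIn w (PySem.Str.lower col)))
  let insights := if ¬ labor_columns.isEmpty then insights ++ ["Labor force data availability varies"] else insights
  let commute_columns := cols.filter (fun col => PySem.Str.isIn "commute" (PySem.Str.lower col))
  let insights := if ¬ commute_columns.isEmpty then insights ++ ["Commute time data availability varies"] else insights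
  let demo_columns := cols.filter (fun col =>
    (["hispanic", "asian", "black", "amerindian"] : List String).any (fun w => PySem.Str.isIn w (PySem.Str.lower col)))
  let insights := if ¬ demo_columns.isEmpty then insights ++ ["Demographic breakdown availability varies"] else insights
  let edu_columns := cols.filter (fun col =>
    (["degree", "diploma", "education"] : List String).any (fun w => PySem.Str.isIn w (PySem.Str.lower col)))
  let insights := if ¬ edu_columns.isEmpty then insights ++ ["Education data availability varies"] else insights
  let geo_columns := cols.filter (fun col =>
    (["geoid", "geo_id"] : List String).any (fun w => PySem.Str.isIn w (PySem.Str.lower col)))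
  let insights := if ¬ geo_columns.isEmpty then insights ++ ["Geographic identifier format varies"] else insights
  let insights :=
    if extra_columns.length > 0 && missing_columns.length > 0 then
      insights ++ ["Schema evolution: " ++ PySem.Int.toStr (extra_columns.length : Int) ++ " new columns, " ++ PySem.Int.toStr (missing_columns.length : Int) ++ " removed columns"]
    else insights
  if ¬ insights.isEmpty then PySem.Str.join "; " insights else "Column structure differences detected"

-- ===== PORT B =====
structure PvFlags where
  f6061t : Bool
  f6061 : Bool
  f6264t : Bool
  f6264 : Bool
  marital : Bool
  labor : Bool
  commute : Bool
  demo : Bool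
  edu : Bool
  geo : Bool
deriving Repr, DecidableEq

def pvStep (f : PvFlags) (col : String) : PvFlags :=
  let low := PySem.Str.lower col
  { f6061t := f.f6061t || PySem.Str.isIn "male_60_to_61" col
    f6061 := f.f6061 || PySem.Str.isIn "male_60_61" col
    f6264t := f.f6264t || PySem.Str.isIn "male_62_to_64" col
    f6264 := f.f6264 || PySem.Str.isIn "male_62_64" col
    marital := f.marital || (["married", "divorced", "widowed", "separated"] : List String).any (fun w => PySem.Str.isIn w low)
    labor := f.labor || (["labor", "employed", "unemployed", "armed_forces"] : List String).any (fun w => PySem.Str.isIn w low)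
    commute := f.commute || PySem.Str.isIn "commute" low
    demo := f.demo || (["hispanic", "asian", "black", "amerindian"] : List String).any (fun w => PySem.Str.isIn w low)
    edu := f.edu || (["degree", "diploma", "education"] : List String).any (fun w => PySem.Str.isIn w low)
    geo := f.geo || (["geoid", "geo_id"] : List String).any (fun w => PySem.Str.isIn w low) }

def analyze_semantic_differences_alt (extra_columns : List String) (missing_columns : List String) : String :=
  if extra_columns.isEmpty && missing_columns.isEmpty then "" else
  let f := (extra_columns ++ missing_columns).foldl pvStep
    ⟨false, false, false, false, false, false, false, false, false, false⟩
  let insights : List String := []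
  let insights := if f.f6061t && f.f6061 then insights ++ ["Column naming variation: 'male_60_61' vs 'male_60_to_61' pattern"] else insights
  let insights := if f.f6264t && f.f6264 then insights ++ ["Column naming variation: 'male_62_64' vs 'male_62_to_64' pattern"] else insights
  let insights := if f.marital then insights ++ ["Marital status data availability varies"] else insights
  let insights := if f.labor then insights ++ ["Labor force data availability varies"] else insights
  let insights := if f.commute then insights ++ ["Commute time data availability varies"] else insights
  let insights := if f.demo then insights ++ ["Demographic breakdown availability varies"] else insights
  let insights := if f.edu then insights ++ ["Education data availability varies"] else insights
  let insights := if f.geo then insights ++ ["Geographic identifier format varies"] else insights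
  let insights :=
    if !extra_columns.isEmpty && !missing_columns.isEmpty then
      insights ++ ["Schema evolution: " ++ PySem.Int.toStr (extra_columns.length : Int) ++ " new columns, " ++ PySem.Int.toStr (missing_columns.length : Int) ++ " removed columns"]
    else insights
  if ¬ insights.isEmpty then PySem.Str.join "; " insights else "Column structure differences detected"

-- ===== PRECONDITION & SPEC =====
def Spec_analyze_semantic_differences (extra_columns : List String) (missing_columns : List String) (out : String) : Prop := out = analyze_semantic_differences_alt extra_columns missing_columns
instance (extra_columns : List String) (missing_columns : List String) (out : String) : Decidable (Spec_analyze_semantic_differences extra_columns missing_columns out) := by unfold Spec_analyze_semantic_differences; infer_instance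

-- ===== CLAIM (what is proved, stated in full; the proofs are below) =====
def Claim_equal_analyze_semantic_differences : Prop := ∀ (extra_columns : List String) (missing_columns : List String), Dom_analyze_semantic_differences extra_columns missing_columns → Spec_analyze_semantic_differences extra_columns missing_columns (analyze_semantic_differences extra_columns missing_columns)

-- ===== LEMMAS AND PROOFS =====

def pvQ (c : String) : Bool := PySem.Str.isIn "male_60" c || PySem.Str.isIn "male_62" c

lemma pv_imp (sub : String)
    (hsub : "male_60".toList <:+: sub.toList ∨ "male_62".toList <:+: sub.toList)
    (c : String) (h : PySem.Str.isIn sub c = true) : pvQ c = true := by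
  rw [PySem.Str.isIn_iff_infix] at h
  rcases hsub with h1 | h1 <;>
    simp only [pvQ, Bool.or_eq_true, PySem.Str.isIn_iff_infix]
  · exact Or.inl (h1.trans h)
  · exact Or.inr (h1.trans h)

lemma pv_any_filter (l : List String) (p q : String → Bool)
    (h : ∀ c, p c = true → q c = true) : (l.filter q).any p = l.any p := by
  rw [Bool.eq_iff_iff]
  simp only [List.any_eq_true, List.mem_filter]
  constructor
  · rintro ⟨c, ⟨hc, _⟩, hpc⟩; exact ⟨c, hc, hpc⟩
  · rintro ⟨c, hc, hpc⟩; exact ⟨c, ⟨hc, h c hpc⟩, hpc⟩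

lemma pv_isEmpty_filter (l : List String) (p : String → Bool) :
    (l.filter p).isEmpty = !(l.any p) := by
  rw [Bool.eq_iff_iff]
  simp [List.isEmpty_iff, List.filter_eq_nil_iff, List.any_eq_false]

lemma pvStep_foldl (l : List String) (f : PvFlags) :
    l.foldl pvStep f =
      ⟨f.f6061t || l.any (fun c => PySem.Str.isIn "male_60_to_61" c),
       f.f6061 || l.any (fun c => PySem.Str.isIn "male_60_61" c),
       f.f6264t || l.any (fun c => PySem.Str.isIn "male_62_to_64" c),
       f.f6264 || l.any (fun c => PySem.Str.isIn "male_62_64" c),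
       f.marital || l.any (fun c => (["married", "divorced", "widowed", "separated"] : List String).any (fun w => PySem.Str.isIn w (PySem.Str.lower c))),
       f.labor || l.any (fun c => (["labor", "employed", "unemployed", "armed_forces"] : List String).any (fun w => PySem.Str.isIn w (PySem.Str.lower c))),
       f.commute || l.any (fun c => PySem.Str.isIn "commute" (PySem.Str.lower c)),
       f.demo || l.any (fun c => (["hispanic", "asian", "black", "amerindian"] : List String).any (fun w => PySem.Str.isIn w (PySem.Str.lower c))),
       f.edu || l.any (fun c => (["degree", "diploma", "education"] : List String).any (fun w => PySem.Str.isIn w (PySem.Str.lower c))),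
       f.geo || l.any (fun c => (["geoid", "geo_id"] : List String).any (fun w => PySem.Str.isIn w (PySem.Str.lower c)))⟩ := by
  induction l generalizing f with
  | nil => simp
  | cons x xs ih => simp [pvStep, ih, Bool.or_assoc]

-- ===== VERDICT (by name: the statement is the Claim_ definition above) =====
theorem analyze_semantic_differences_spec : Claim_equal_analyze_semantic_differences := by
  intro e m _
  unfold Spec_analyze_semantic_differences
  unfold analyze_semantic_differences analyze_semantic_differences_alt
  by_cases h0 : (e.isEmpty && m.isEmpty) = true
  · simp [h0]
  · rw [if_neg h0, if_neg h0]
    have hfold : ∀ acc : List String,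
        (e ++ m).foldl (fun acc col => if PySem.Str.isIn "male_60" col || PySem.Str.isIn "male_62" col then acc ++ [col] else acc) acc
          = acc ++ (e ++ m).filter pvQ := by
      intro acc
      exact PySem.List.foldl_append_if_eq_filter _ _ _
    rw [pvStep_foldl]
    simp only [hfold, List.nil_append]
    have e1 := pv_any_filter (e ++ m) (fun c => PySem.Str.isIn "male_60_to_61" c) pvQ
      (pv_imp _ (Or.inl (by decide)))
    have e2 := pv_any_filter (e ++ m) (fun c => PySem.Str.isIn "male_60_61" c) pvQ
      (pv_imp _ (Or.inl (by decide)))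
    have e3 := pv_any_filter (e ++ m) (fun c => PySem.Str.isIn "male_62_to_64" c) pvQ
      (pv_imp _ (Or.inr (by decide)))
    have e4 := pv_any_filter (e ++ m) (fun c => PySem.Str.isIn "male_62_64" c) pvQ
      (pv_imp _ (Or.inr (by decide)))
    have hs : (decide (0 < e.length) && decide (0 < m.length)) = (!e.isEmpty && !m.isEmpty) := by
      cases e <;> cases m <;> simp
    by_cases hE : ((e ++ m).filter pvQ).isEmpty = true
    · have hF : (e ++ m).filter pvQ = [] := List.isEmpty_iff.mp hE
      have h1 : ((e ++ m).any fun c => PySem.Str.isIn "male_60_to_61" c) = false := by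
        rw [← e1, hF]; rfl
      have h2 : ((e ++ m).any fun c => PySem.Str.isIn "male_60_61" c) = false := by
        rw [← e2, hF]; rfl
      have h3 : ((e ++ m).any fun c => PySem.Str.isIn "male_62_to_64" c) = false := by
        rw [← e3, hF]; rfl
      have h4 : ((e ++ m).any fun c => PySem.Str.isIn "male_62_64" c) = false := by
        rw [← e4, hF]; rfl
      simp only [hE, pv_isEmpty_filter, e1, e2, e3, e4, h1, h2, h3, h4, hs,
        Bool.false_or, Bool.false_and, Bool.and_false, Bool.not_eq_true, Bool.not_eq_false, Bool.not_eq_true', Bool.not_eq_false', List.nil_append,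
        not_true, not_false_iff, if_true, if_false, ite_false, ite_true, Bool.false_eq_true]
    · simp only [hE, pv_isEmpty_filter, e1, e2, e3, e4, hs,
        Bool.false_or, Bool.not_eq_true, Bool.not_eq_false, Bool.not_eq_true', Bool.not_eq_false', List.nil_append, if_true, ite_true]
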